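-- pv_equiv track=rewrite | github.com/qianliu013/leetcode | medium/636.py | _solve
-- ===== SOURCE A (Python) =====
-- def _solve(n, logs):
--     res, prev, f_ids = [0] * n, 0, []
--     for log in logs:
--         splits = log.split(':')
--         cur_f_id, is_start, timestamp = int(splits[0]), splits[1] == 'start', int(splits[2])
--         if is_start:
--             if f_ids:
--                 res[f_ids[-1]] += timestamp - prev
--             f_ids.append(cur_f_id)
--             prev = timestamp
--         else:
--             res[f_ids.pop()] += timestamp - prev + 1
--             prev = timestamp + 1
--     return res
-- ===== SOURCE B (Python) =====
-- def _solve(n, logs):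
--     res = [0] * n
--     stack = []  # frames: [func_id, start_ts, time consumed by completed children]
--     for log in logs:
--         parts = log.split(':')
--         fid, typ, ts = int(parts[0]), parts[1], int(parts[2])
--         if typ == 'start':
--             stack.append([fid, ts, 0])
--         else:
--             f, start, child = stack.pop()
--             total = ts - start + 1
--             res[f] += total - child
--             if stack:
--                 stack[-1][2] += total
--     return res
-- ===== Notes on version B (the rewrite author's own statement) =====
-- stated objective: alternative
-- what changed: B replaces A's running prev-pointer delta accounting (crediting the current top function at every log) by per-frame accounting: the stack holds (id, start_time, completed-children-time) frames and each call's exclusive time is charged once at its 'end' log as total minus children time, crediting the total to the parent frame.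
-- outside the precondition, e.g. on _solve(2, ['0:start:0', '1:start:3']): A returns [3, 0], B returns [0, 0]
import Mathlib
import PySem

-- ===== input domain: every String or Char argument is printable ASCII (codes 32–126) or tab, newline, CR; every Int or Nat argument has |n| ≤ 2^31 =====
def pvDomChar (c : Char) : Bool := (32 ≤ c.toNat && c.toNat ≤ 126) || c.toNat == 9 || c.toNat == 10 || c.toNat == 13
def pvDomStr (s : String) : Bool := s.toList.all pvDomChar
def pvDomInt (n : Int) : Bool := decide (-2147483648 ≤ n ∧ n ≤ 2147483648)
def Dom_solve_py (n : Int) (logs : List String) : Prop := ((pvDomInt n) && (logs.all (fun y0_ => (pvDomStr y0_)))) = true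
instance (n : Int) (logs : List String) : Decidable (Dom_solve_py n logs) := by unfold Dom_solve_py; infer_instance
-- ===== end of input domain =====

-- B replaces A's running prev-pointer delta accounting by per-frame accounting: the stack
-- holds (id, start, completed-children time) frames and the whole exclusive time of a call is
-- charged once, at its 'end' log, as total minus children; same O(n) cost (objective: alternative).

-- ===== PORT A =====
-- loop body of A: state (res, prev, f_ids); f_ids is a stack with its top at the list head
def solveAStep (st : List Int × Int × List Int) (log : String) : List Int × Int × List Int :=
  let res := st.1
  let prev := st.2.1
  let fids := st.2.2
  let splits := (PySem.Str.split? log ":").getD []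
  let curId := (PySem.Int.ofStr? (splits.getD 0 "")).getD 0
  let isStart := splits.getD 1 "" == "start"
  let timestamp := (PySem.Int.ofStr? (splits.getD 2 "")).getD 0
  if isStart then
    match fids with
    | [] => (res, timestamp, curId :: fids)
    | top :: _ =>
        (PySem.List.pySetD res top (PySem.List.pyGetD res top 0 + (timestamp - prev)),
         timestamp, curId :: fids)
  else
    match fids with
    | [] => (res, timestamp + 1, [])   -- Python A raises here (pop from empty); excluded by Pre_
    | top :: rest =>
        (PySem.List.pySetD res top (PySem.List.pyGetD res top 0 + (timestamp - prev + 1)),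
         timestamp + 1, rest)

def solve_py (n : Int) (logs : List String) : List Int :=
  (logs.foldl solveAStep (List.replicate n.toNat 0, 0, [])).1

-- ===== PORT B =====
-- loop body of B: state (res, stack of frames (func_id, start_ts, completed-children time))
def solveBStep (st : List Int × List (Int × Int × Int)) (log : String) : List Int × List (Int × Int × Int) :=
  let res := st.1
  let stack := st.2
  let parts := (PySem.Str.split? log ":").getD []
  let fid := (PySem.Int.ofStr? (parts.getD 0 "")).getD 0
  let typ := parts.getD 1 ""
  let ts := (PySem.Int.ofStr? (parts.getD 2 "")).getD 0
  if typ == "start" then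
    (res, (fid, ts, 0) :: stack)
  else
    match stack with
    | [] => (res, [])   -- Python B raises here (pop from empty); excluded by Pre_
    | (f, start, child) :: rest =>
        let total := ts - start + 1
        let res' := PySem.List.pySetD res f (PySem.List.pyGetD res f 0 + (total - child))
        match rest with
        | [] => (res', [])
        | (f2, s2, c2) :: rr => (res', (f2, s2, c2 + total) :: rr)

def solve_py_alt (n : Int) (logs : List String) : List Int :=
  (logs.foldl solveBStep (List.replicate n.toNat 0, [])).1

-- ===== PRECONDITION & SPEC =====
-- one log is well formed: at least 3 ':'-fields, int-parseable id and timestamp, and (for a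
-- 'start' log, whose id is the one A indexes res with) an id in range for a list of length n
def pvLogOk (n : Int) (s : String) : Bool :=
  let sp := (PySem.Str.split? s ":").getD []
  decide (3 ≤ sp.length) &&
  (PySem.Int.ofStr? (sp.getD 0 "")).isSome &&
  (PySem.Int.ofStr? (sp.getD 2 "")).isSome &&
  (if sp.getD 1 "" == "start" then
     decide (PySem.Raise.InRange n.toNat ((PySem.Int.ofStr? (sp.getD 0 "")).getD 0))
   else true)

-- nesting depth of the log list, none as soon as an 'end' appears at depth 0
def pvDepthStep (d : Option Nat) (log : String) : Option Nat :=
  d.bind fun k =>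
    if ((PySem.Str.split? log ":").getD []).getD 1 "" == "start" then some (k + 1)
    else match k with
         | 0 => none
         | Nat.succ k' => some k'

def pvDepth (logs : List String) : Option Nat := logs.foldl pvDepthStep (some 0)

-- Pre_ excludes the inputs where Python A raises (malformed logs, an out-of-range function id,
-- an 'end' with no open call) and, in addition, truncated logs that leave calls open at the end
-- (pvDepth = some k, k > 0): there A returns partial running-delta credit for the still-open
-- frames while B credits an unfinished call nothing — both are defensible on logs the problem
-- statement never produces.
def Pre_solve_py (n : Int) (logs : List String) : Prop :=
  logs.all (pvLogOk n) = true ∧ pvDepth logs = some 0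

instance (n : Int) (logs : List String) : Decidable (Pre_solve_py n logs) := by
  unfold Pre_solve_py; infer_instance

def pvWitness_solve_py : Int × List String := (2, ["0:start:0", "1:start:2", "1:end:5", "0:end:6"])

def Spec_solve_py (n : Int) (logs : List String) (out : List Int) : Prop := out = solve_py_alt n logs
instance (n : Int) (logs : List String) (out : List Int) : Decidable (Spec_solve_py n logs out) := by
  unfold Spec_solve_py; infer_instance

-- ===== CLAIM (what is proved, stated in full; the proofs are below) =====
def Claim_equal_solve_py : Prop := ∀ (n : Int) (logs : List String), Dom_solve_py n logs → Pre_solve_py n logs → Spec_solve_py n logs (solve_py n logs)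

-- ===== LEMMAS AND PROOFS =====

-- res[j] += δ with Python index semantics (a no-op when j is out of range, as pySetD is)
def opAdd (res : List Int) (j δ : Int) : List Int :=
  PySem.List.pySetD res j (PySem.List.pyGetD res j 0 + δ)

-- what A has already credited to the still-open frames, folded over B's stack: the top frame
-- has accrued (p - start - child) so far, the frame below it accrued up to its child's start, …
def pending : List (Int × Int × Int) → Int → List Int → List Int
  | [], _, res => res
  | (f, s, c) :: rest, p, res => pending rest s (opAdd res f (p - s - c))

-- the id and timestamp fields a log line parses to, as the ports compute them
def iOf (log : String) : Int := (PySem.Int.ofStr? (((PySem.Str.split? log ":").getD []).getD 0 "")).getD 0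
def tOf (log : String) : Int := (PySem.Int.ofStr? (((PySem.Str.split? log ":").getD []).getD 2 "")).getD 0
def isStartOf (log : String) : Bool := ((PySem.Str.split? log ":").getD []).getD 1 "" == "start"

theorem pyIdx?_lt {nn : Nat} {i : Int} {k : Nat} (h : PySem.List.pyIdx? nn i = some k) : k < nn := by
  unfold PySem.List.pyIdx? at h
  split_ifs at h <;> simp_all <;> omega

theorem opAdd_of_none {res : List Int} {j : Int} (δ : Int)
    (h : PySem.List.pyIdx? res.length j = none) : opAdd res j δ = res := by
  unfold opAdd PySem.List.pySetD PySem.List.pySet?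
  rw [h]; rfl

theorem opAdd_of_some {res : List Int} {j : Int} {k : Nat} (δ : Int)
    (h : PySem.List.pyIdx? res.length j = some k) :
    opAdd res j δ = res.set k (res.getD k 0 + δ) := by
  have hk := pyIdx?_lt h
  unfold opAdd PySem.List.pySetD PySem.List.pySet? PySem.List.pyGetD PySem.List.pyGet?
  rw [h]
  simp [List.getD_eq_getElem?_getD, List.getElem?_eq_getElem hk]

theorem opAdd_zero (res : List Int) (j : Int) : opAdd res j 0 = res := by
  cases h : PySem.List.pyIdx? res.length j with
  | none => exact opAdd_of_none 0 h
  | some k =>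
    have hk := pyIdx?_lt h
    rw [opAdd_of_some 0 h]
    simp [List.getD_eq_getElem?_getD, List.getElem?_eq_getElem hk, List.set_getElem_self]

theorem opAdd_opAdd_same (res : List Int) (j δ γ : Int) :
    opAdd (opAdd res j δ) j γ = opAdd res j (δ + γ) := by
  cases h : PySem.List.pyIdx? res.length j with
  | none =>
    rw [opAdd_of_none δ h, opAdd_of_none γ h, opAdd_of_none (δ + γ) h]
  | some k =>
    have hk := pyIdx?_lt h
    rw [opAdd_of_some δ h]
    have hl : (res.set k (res.getD k 0 + δ)).length = res.length := by simp
    have h2 : PySem.List.pyIdx? (res.set k (res.getD k 0 + δ)).length j = some k := by rw [hl]; exact h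
    rw [opAdd_of_some γ h2, opAdd_of_some (δ + γ) h]
    have hg : (res.set k (res.getD k 0 + δ)).getD k 0 = res.getD k 0 + δ := by
      simp [List.getD_eq_getElem?_getD, List.getElem?_set_self', List.getElem?_eq_getElem hk]
    rw [hg, List.set_set]
    ring_nf

theorem opAdd_comm (res : List Int) (j δ k γ : Int) :
    opAdd (opAdd res j δ) k γ = opAdd (opAdd res k γ) j δ := by
  cases hj : PySem.List.pyIdx? res.length j with
  | none =>
    cases hk : PySem.List.pyIdx? res.length k with
    | none =>
      rw [opAdd_of_none δ hj, opAdd_of_none γ hk, opAdd_of_none δ hj]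
    | some k2 =>
      rw [opAdd_of_none δ hj, opAdd_of_some γ hk]
      have hl : (res.set k2 (res.getD k2 0 + γ)).length = res.length := by simp
      rw [opAdd_of_none (res := res.set k2 (res.getD k2 0 + γ)) δ (by rw [hl]; exact hj)]
  | some j2 =>
    cases hk : PySem.List.pyIdx? res.length k with
    | none =>
      rw [opAdd_of_some δ hj, opAdd_of_none γ hk]
      have hl : (res.set j2 (res.getD j2 0 + δ)).length = res.length := by simp
      rw [opAdd_of_none (res := res.set j2 (res.getD j2 0 + δ)) γ (by rw [hl]; exact hk),
          opAdd_of_some δ hj]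
    | some k2 =>
      have hj2 := pyIdx?_lt hj
      have hk2 := pyIdx?_lt hk
      have hl1 : ∀ v : Int, (res.set j2 v).length = res.length := fun v => by simp
      have hl2 : ∀ v : Int, (res.set k2 v).length = res.length := fun v => by simp
      by_cases hsame : j2 = k2
      · subst hsame
        rw [opAdd_of_some δ hj,
            opAdd_of_some (res := res.set j2 (res.getD j2 0 + δ)) γ (by rw [hl1]; exact hk),
            opAdd_of_some γ hk,
            opAdd_of_some (res := res.set j2 (res.getD j2 0 + γ)) δ (by rw [hl2]; exact hj)]
        have g1 : (res.set j2 (res.getD j2 0 + δ)).getD j2 0 = res.getD j2 0 + δ := by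
          simp [List.getD_eq_getElem?_getD, List.getElem?_set_self', List.getElem?_eq_getElem hj2]
        have g2 : (res.set j2 (res.getD j2 0 + γ)).getD j2 0 = res.getD j2 0 + γ := by
          simp [List.getD_eq_getElem?_getD, List.getElem?_set_self', List.getElem?_eq_getElem hj2]
        rw [g1, g2, List.set_set, List.set_set]
        ring_nf
      · rw [opAdd_of_some δ hj,
            opAdd_of_some (res := res.set j2 (res.getD j2 0 + δ)) γ (by rw [hl1]; exact hk),
            opAdd_of_some γ hk,
            opAdd_of_some (res := res.set k2 (res.getD k2 0 + γ)) δ (by rw [hl2]; exact hj)]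
        have g1 : (res.set j2 (res.getD j2 0 + δ)).getD k2 0 = res.getD k2 0 := by
          simp [List.getD_eq_getElem?_getD, List.getElem?_set_ne hsame]
        have g2 : (res.set k2 (res.getD k2 0 + γ)).getD j2 0 = res.getD j2 0 := by
          simp [List.getD_eq_getElem?_getD, List.getElem?_set_ne (Ne.symm hsame)]
        rw [g1, g2, List.set_comm _ _ hsame]

theorem pending_opAdd (st : List (Int × Int × Int)) (p : Int) (res : List Int) (j δ : Int) :
    pending st p (opAdd res j δ) = opAdd (pending st p res) j δ := by
  induction st generalizing p res with
  | nil => rfl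
  | cons fr rest ih =>
    obtain ⟨f, s, c⟩ := fr
    simp only [pending]
    rw [opAdd_comm, ih]

-- one-step evaluation lemmas for the two loop bodies
theorem stepA_start_nil (resA : List Int) (prev : Int) (log : String) (h : isStartOf log = true) :
    solveAStep (resA, prev, []) log = (resA, tOf log, [iOf log]) := by
  simp only [solveAStep, isStartOf, iOf, tOf] at h ⊢
  rw [if_pos h]

theorem stepA_start_cons (resA : List Int) (prev : Int) (top : Int) (rest : List Int)
    (log : String) (h : isStartOf log = true) :
    solveAStep (resA, prev, top :: rest) log
      = (opAdd resA top (tOf log - prev), tOf log, iOf log :: top :: rest) := by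
  simp only [solveAStep, isStartOf, iOf, tOf, opAdd] at h ⊢
  rw [if_pos h]

theorem stepA_end_nil (resA : List Int) (prev : Int) (log : String) (h : isStartOf log = false) :
    solveAStep (resA, prev, []) log = (resA, tOf log + 1, []) := by
  simp only [solveAStep, isStartOf, tOf] at h ⊢
  rw [h]; rfl

theorem stepA_end_cons (resA : List Int) (prev : Int) (top : Int) (rest : List Int) (log : String)
    (h : isStartOf log = false) :
    solveAStep (resA, prev, top :: rest) log
      = (opAdd resA top (tOf log - prev + 1), tOf log + 1, rest) := by
  simp only [solveAStep, isStartOf, tOf, opAdd] at h ⊢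
  rw [h]; rfl

theorem stepB_start (resB : List Int) (stack : List (Int × Int × Int)) (log : String)
    (h : isStartOf log = true) :
    solveBStep (resB, stack) log = (resB, (iOf log, tOf log, 0) :: stack) := by
  simp only [solveBStep, isStartOf, iOf, tOf] at h ⊢
  rw [if_pos h]

theorem stepB_end_nil (resB : List Int) (log : String) (h : isStartOf log = false) :
    solveBStep (resB, []) log = (resB, []) := by
  simp only [solveBStep, isStartOf] at h ⊢
  rw [h]; rfl

theorem stepB_end_one (resB : List Int) (f s c : Int) (log : String) (h : isStartOf log = false) :
    solveBStep (resB, [(f, s, c)]) log = (opAdd resB f (tOf log - s + 1 - c), []) := by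
  simp only [solveBStep, isStartOf, tOf, opAdd] at h ⊢
  rw [h]
  simp

theorem stepB_end_cons (resB : List Int) (f s c f2 s2 c2 : Int) (rr : List (Int × Int × Int))
    (log : String) (h : isStartOf log = false) :
    solveBStep (resB, (f, s, c) :: (f2, s2, c2) :: rr) log
      = (opAdd resB f (tOf log - s + 1 - c), (f2, s2, c2 + (tOf log - s + 1)) :: rr) := by
  simp only [solveBStep, isStartOf, tOf, opAdd] at h ⊢
  rw [h]
  simp

-- main invariant: running A from state (pending stack prev resB, prev, stack ids) and B from
-- (resB, stack) over the same logs keeps A's result equal to 'pending' of B's state.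
theorem main_inv (logs : List String) :
    ∀ (resB : List Int) (stack : List (Int × Int × Int)) (prev : Int),
    (logs.foldl solveAStep (pending stack prev resB, prev, stack.map (·.1))).1 =
      pending (logs.foldl solveBStep (resB, stack)).2
        (logs.foldl solveAStep (pending stack prev resB, prev, stack.map (·.1))).2.1
        (logs.foldl solveBStep (resB, stack)).1 := by
  induction logs with
  | nil => intro resB stack prev; rfl
  | cons log rest ih =>
    intro resB stack prev
    simp only [List.foldl_cons]
    by_cases hS : isStartOf log = true
    · -- 'start' log: B pushes (iOf, tOf, 0); A credits the old top up to tOf and pushes iOf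
      rw [stepB_start resB stack log hS]
      cases stack with
      | nil =>
        simp only [List.map_nil]
        rw [stepA_start_nil (pending [] prev resB) prev log hS]
        have hX : (pending ([] : List (Int × Int × Int)) prev resB : List Int)
            = pending [(iOf log, tOf log, 0)] (tOf log) resB := by
          simp only [pending]
          rw [show tOf log - tOf log - 0 = 0 by ring, opAdd_zero]
        rw [hX]
        simpa only [List.map_cons, List.map_nil] using ih resB [(iOf log, tOf log, 0)] (tOf log)
      | cons fr st' =>
        obtain ⟨f, s, c⟩ := fr
        simp only [List.map_cons]
        rw [stepA_start_cons (pending ((f, s, c) :: st') prev resB) prev f (st'.map (·.1)) log hS]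
        have hX : opAdd (pending ((f, s, c) :: st') prev resB) f (tOf log - prev)
            = pending ((iOf log, tOf log, 0) :: (f, s, c) :: st') (tOf log) resB := by
          simp only [pending]
          rw [show tOf log - tOf log - 0 = 0 by ring, opAdd_zero, ← pending_opAdd,
              opAdd_opAdd_same,
              show prev - s - c + (tOf log - prev) = tOf log - s - c by ring]
        rw [hX]
        simpa only [List.map_cons, List.map_nil] using
          ih resB ((iOf log, tOf log, 0) :: (f, s, c) :: st') (tOf log)
    · -- 'end' log
      have hS' : isStartOf log = false := by simpa using hS
      cases stack with
      | nil =>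
        simp only [List.map_nil]
        rw [stepB_end_nil resB log hS', stepA_end_nil (pending [] prev resB) prev log hS']
        simpa only [List.map_nil] using ih resB [] (tOf log + 1)
      | cons fr st' =>
        obtain ⟨f, s, c⟩ := fr
        cases st' with
        | nil =>
          simp only [List.map_cons, List.map_nil]
          rw [stepB_end_one resB f s c log hS',
              stepA_end_cons (pending [(f, s, c)] prev resB) prev f [] log hS']
          have hX : opAdd (pending [(f, s, c)] prev resB) f (tOf log - prev + 1)
              = pending ([] : List (Int × Int × Int)) (tOf log + 1)
                  (opAdd resB f (tOf log - s + 1 - c)) := by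
            simp only [pending]
            rw [opAdd_opAdd_same,
                show prev - s - c + (tOf log - prev + 1) = tOf log - s + 1 - c by ring]
          rw [hX]
          simpa only [List.map_nil] using ih (opAdd resB f (tOf log - s + 1 - c)) [] (tOf log + 1)
        | cons fr2 rr =>
          obtain ⟨f2, s2, c2⟩ := fr2
          simp only [List.map_cons]
          rw [stepB_end_cons resB f s c f2 s2 c2 rr log hS',
              stepA_end_cons (pending ((f, s, c) :: (f2, s2, c2) :: rr) prev resB) prev f
                (f2 :: rr.map (·.1)) log hS']
          have hX : opAdd (pending ((f, s, c) :: (f2, s2, c2) :: rr) prev resB) f (tOf log - prev + 1)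
              = pending ((f2, s2, c2 + (tOf log - s + 1)) :: rr) (tOf log + 1)
                  (opAdd resB f (tOf log - s + 1 - c)) := by
            simp only [pending]
            rw [← pending_opAdd, opAdd_comm, opAdd_opAdd_same,
                show prev - s - c + (tOf log - prev + 1) = tOf log - s + 1 - c by ring,
                show tOf log + 1 - s2 - (c2 + (tOf log - s + 1)) = s - s2 - c2 by ring]
          rw [hX]
          simpa only [List.map_cons, List.map_nil] using
            ih (opAdd resB f (tOf log - s + 1 - c)) ((f2, s2, c2 + (tOf log - s + 1)) :: rr) (tOf log + 1)

theorem depth_none (logs : List String) : logs.foldl pvDepthStep none = none := by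
  induction logs with
  | nil => rfl
  | cons l rest ih => simp only [List.foldl_cons, pvDepthStep, Option.bind_none]; exact ih

theorem pvDepthStep_some (k : Nat) (log : String) :
    pvDepthStep (some k) log
      = if isStartOf log then some (k + 1)
        else match k with | 0 => none | Nat.succ k' => some k' := rfl

theorem depth_stack (logs : List String) :
    ∀ (resB : List Int) (stack : List (Int × Int × Int)) (d : Nat),
    logs.foldl pvDepthStep (some stack.length) = some d →
    ((logs.foldl solveBStep (resB, stack)).2).length = d := by
  induction logs with
  | nil => intro resB stack d h; simp at h; simp [h]
  | cons log rest ih =>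
    intro resB stack d h
    simp only [List.foldl_cons] at h ⊢
    by_cases hS : isStartOf log = true
    · rw [show pvDepthStep (some stack.length) log = some (stack.length + 1) by
            rw [pvDepthStep_some, if_pos hS]] at h
      rw [stepB_start resB stack log hS]
      exact ih resB _ d (by simpa using h)
    · have hS' : isStartOf log = false := by simpa using hS
      cases stack with
      | nil =>
        rw [show pvDepthStep (some ([] : List (Int × Int × Int)).length) log = none by
              rw [pvDepthStep_some, if_neg (by simp [hS'])]; rfl] at h
        rw [depth_none] at h
        exact absurd h (by simp)
      | cons fr st' =>
        obtain ⟨f, s, c⟩ := fr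
        rw [show pvDepthStep (some ((f, s, c) :: st').length) log = some st'.length by
              rw [pvDepthStep_some, if_neg (by simp [hS'])]; rfl] at h
        cases st' with
        | nil =>
          rw [stepB_end_one resB f s c log hS']
          exact ih _ [] d h
        | cons fr2 rr =>
          obtain ⟨f2, s2, c2⟩ := fr2
          rw [stepB_end_cons resB f s c f2 s2 c2 rr log hS']
          exact ih _ ((f2, s2, c2 + (tOf log - s + 1)) :: rr) d (by simpa using h)

-- ===== VERDICT (by name: the statement is the Claim_ definition above) =====
theorem solve_py_spec : Claim_equal_solve_py := by
  intro n logs _hDom hPre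
  unfold Spec_solve_py solve_py solve_py_alt
  have h1 := main_inv logs (List.replicate n.toNat 0) [] 0
  simp only [pending, List.map] at h1
  have hempty : (logs.foldl solveBStep (List.replicate n.toNat 0, [])).2 = [] := by
    have := depth_stack logs (List.replicate n.toNat 0) [] 0 (by simpa [pvDepth] using hPre.2)
    simpa using this
  rw [hempty] at h1
  simpa [pending] using h1
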